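-- pv_equiv track=rewrite | github.com/WuZY01/IR_camera_calibration | utils.py | find_extreme_points
-- ===== SOURCE A (Python) =====
-- def find_extreme_points(points):
--     """
--     Finds the points with the minimum and maximum sum of coordinates in a set of points.
--
--     :param points: A list of tuples, where each tuple contains (x, y) coordinates of a point.
--     :return: A tuple containing two points (min_sum_point, max_sum_point).
--     """
--     # Initialize variables to store the points with extreme sums
--     min_sum = float('inf')
--     max_sum = float('-inf')
--     min_sum_point = None
--     max_sum_point = None
--
--     # Iterate over the points to find the sums and the corresponding points
--     for point in points:
--         x, y = point
--         current_sum = x + y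
--
--         # Update the points with minimum and maximum sums
--         if current_sum < min_sum:
--             min_sum = current_sum
--             min_sum_point = point
--         if current_sum > max_sum:
--             max_sum = current_sum
--             max_sum_point = point
--
--     return min_sum_point, max_sum_point
-- ===== SOURCE B (Python) =====
-- def find_extreme_points(points):
--     """
--     Finds the points with the minimum and maximum sum of coordinates in a set of points.
--
--     :param points: A list of tuples, where each tuple contains (x, y) coordinates of a point.
--     :return: A tuple containing two points (min_sum_point, max_sum_point).
--     """
--     if not points:
--         return None, None
--     key = lambda p: p[0] + p[1]
--     asc = sorted(points, key=key)
--     desc = sorted(points, key=key, reverse=True)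
--     # Stability of sorted: among equal sums the original order is kept, so
--     # asc[0]/desc[0] are the FIRST points attaining the min/max sum, matching
--     # A's strict-inequality first-wins updates.
--     return asc[0], desc[0]
-- ===== Notes on version B (the rewrite author's own statement) =====
-- stated objective: alternative
-- what changed: Replaced the single scan with four running-state variables by a sort-then-pick algorithm: stable-sort the points by coordinate sum ascending and descending and take the first element of each sorted list (stability reproduces A's first-wins tie-breaking).
import Mathlib
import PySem

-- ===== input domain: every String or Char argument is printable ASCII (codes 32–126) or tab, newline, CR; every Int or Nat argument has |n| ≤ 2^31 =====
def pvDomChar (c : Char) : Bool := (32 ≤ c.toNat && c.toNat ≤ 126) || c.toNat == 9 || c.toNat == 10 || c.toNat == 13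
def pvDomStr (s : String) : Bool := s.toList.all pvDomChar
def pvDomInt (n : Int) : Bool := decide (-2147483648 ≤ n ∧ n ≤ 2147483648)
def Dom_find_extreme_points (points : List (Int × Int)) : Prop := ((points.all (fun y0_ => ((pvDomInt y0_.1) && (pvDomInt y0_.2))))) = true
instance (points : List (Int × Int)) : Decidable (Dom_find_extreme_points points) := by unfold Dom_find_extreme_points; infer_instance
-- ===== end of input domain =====

-- B replaces A's single scan with running min/max state by a sort-then-pick
-- algorithm: stable-sort by coordinate sum ascending and descending, take the
-- first element of each (stability reproduces A's first-wins tie-breaking).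


-- ===== PORT A =====
-- Loop body of A: state is (min_sum, max_sum, min_sum_point, max_sum_point);
-- min_sum/max_sum are Option Int with none standing for the initial float('inf')/float('-inf')
-- (any int sum compares strictly below inf and strictly above -inf, so the none branch takes the update).
def pvStepA (st : Option Int × Option Int × Option (Int × Int) × Option (Int × Int))
    (point : Int × Int) : Option Int × Option Int × Option (Int × Int) × Option (Int × Int) :=
  let (minSum, maxSum, minPt, maxPt) := st
  let currentSum := point.1 + point.2
  let (minSum, minPt) :=
    if (match minSum with | none => true | some m => decide (currentSum < m)) then
      (some currentSum, some point)
    else (minSum, minPt)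
  let (maxSum, maxPt) :=
    if (match maxSum with | none => true | some m => decide (m < currentSum)) then
      (some currentSum, some point)
    else (maxSum, maxPt)
  (minSum, maxSum, minPt, maxPt)

def find_extreme_points (points : List (Int × Int)) : (Option (Int × Int)) × (Option (Int × Int)) :=
  let st := points.foldl pvStepA (none, none, none, none)
  (st.2.2.1, st.2.2.2)

-- ===== PORT B =====
def pvKey (p : Int × Int) : Int := p.1 + p.2

def find_extreme_points_alt (points : List (Int × Int)) : (Option (Int × Int)) × (Option (Int × Int)) :=
  match points with
  | [] => (none, none)
  | _ :: _ =>
    let asc := PySem.List.sorted points pvKey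
    let desc := PySem.List.sorted points pvKey true
    (PySem.List.pyGet? asc 0, PySem.List.pyGet? desc 0)

-- ===== PRECONDITION & SPEC =====
def Spec_find_extreme_points (points : List (Int × Int)) (out : (Option (Int × Int)) × (Option (Int × Int))) : Prop := out = find_extreme_points_alt points
instance (points : List (Int × Int)) (out : (Option (Int × Int)) × (Option (Int × Int))) : Decidable (Spec_find_extreme_points points out) := by unfold Spec_find_extreme_points; infer_instance

-- ===== CLAIM (what is proved, stated in full; the proofs are below) =====
def Claim_equal_find_extreme_points : Prop := ∀ (points : List (Int × Int)), Dom_find_extreme_points points → Spec_find_extreme_points points (find_extreme_points points)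

-- ===== LEMMAS AND PROOFS =====
-- The first-wins running min/max over the key, as option-valued folds.
def pvFmin (acc : Option (Int × Int)) (x : Int × Int) : Option (Int × Int) :=
  match acc with | none => some x | some m => if pvKey x < pvKey m then some x else some m

def pvFmax (acc : Option (Int × Int)) (x : Int × Int) : Option (Int × Int) :=
  match acc with | none => some x | some m => if pvKey m < pvKey x then some x else some m

-- A's fold carries exactly (key of min point, key of max point, min point, max point).
theorem pv_stepA_corr (mp xp : Option (Int × Int)) (p : Int × Int) :
    pvStepA (mp.map pvKey, xp.map pvKey, mp, xp) p
      = ((pvFmin mp p).map pvKey, (pvFmax xp p).map pvKey, pvFmin mp p, pvFmax xp p) := by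
  cases mp <;> cases xp <;>
    simp [pvStepA, pvFmin, pvFmax, pvKey] <;> split_ifs <;> simp [pvKey]

theorem pv_foldA (l : List (Int × Int)) : ∀ mp xp : Option (Int × Int),
    List.foldl pvStepA (mp.map pvKey, xp.map pvKey, mp, xp) l
      = ((List.foldl pvFmin mp l).map pvKey, (List.foldl pvFmax xp l).map pvKey,
         List.foldl pvFmin mp l, List.foldl pvFmax xp l) := by
  induction l with
  | nil => intro mp xp; simp
  | cons h t ih =>
      intro mp xp
      simp only [List.foldl_cons]
      rw [pv_stepA_corr]
      exact ih _ _

theorem pv_A_eq (points : List (Int × Int)) :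
    find_extreme_points points
      = (List.foldl pvFmin none points, List.foldl pvFmax none points) := by
  unfold find_extreme_points
  have h := pv_foldA points none none
  simp only [Option.map_none] at h
  rw [h]

-- Head of an insertBy insertion: the new element wins iff `before` says so.
theorem pv_head_insertBy (p : (Int × Int) → (Int × Int) → Bool) (x : Int × Int)
    (acc : List (Int × Int)) :
    (PySem.List.insertBy p x acc).head?
      = (match acc.head? with
         | none => some x
         | some h => if p x h then some x else some h) := by
  cases acc with
  | nil => simp [PySem.List.insertBy]
  | cons h t =>
      simp only [PySem.List.insertBy, List.head?_cons]
      split_ifs <;> simp_all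

-- The head of the insertion-sort accumulator evolves exactly by that option step.
theorem pv_head_foldl_insertBy (p : (Int × Int) → (Int × Int) → Bool)
    (l : List (Int × Int)) : ∀ acc : List (Int × Int),
    (List.foldl (fun a x => PySem.List.insertBy p x a) acc l).head?
      = List.foldl
          (fun o x => match o with
            | none => some x
            | some h => if p x h then some x else some h)
          acc.head? l := by
  induction l with
  | nil => intro acc; rfl
  | cons h t ih =>
      intro acc
      simp only [List.foldl_cons]
      rw [ih, pv_head_insertBy]

theorem pv_head_sorted (points : List (Int × Int)) :
    (PySem.List.sorted points pvKey).head? = List.foldl pvFmin none points := by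
  rw [PySem.List.sorted_eq_foldl_insertBy, pv_head_foldl_insertBy]
  congr 1
  funext o x
  cases o <;> simp [pvFmin]

theorem pv_head_sorted_rev (points : List (Int × Int)) :
    (PySem.List.sorted points pvKey true).head? = List.foldl pvFmax none points := by
  rw [PySem.List.sorted_rev_eq_foldl_insertBy, pv_head_foldl_insertBy]
  congr 1
  funext o x
  cases o <;> simp [pvFmax]

theorem pv_pyGet?_zero (l : List (Int × Int)) : PySem.List.pyGet? l 0 = l.head? := by
  cases l <;> simp [PySem.List.pyGet?, PySem.List.pyIdx?]

-- ===== VERDICT (by name: the statement is the Claim_ definition above) =====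
theorem find_extreme_points_spec : Claim_equal_find_extreme_points := by
  intro points _
  unfold Spec_find_extreme_points
  rw [pv_A_eq]
  cases points with
  | nil => rfl
  | cons h t =>
      unfold find_extreme_points_alt
      simp only [pv_pyGet?_zero]
      rw [pv_head_sorted, pv_head_sorted_rev]
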